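-- pv_equiv track=rewrite | github.com/primrose101/CS322 | finite_state_machines/logical_operator.py | and_fsm
-- ===== SOURCE A (Python) =====
-- def and_fsm(string_input, index):
--     i = index
--
--     table = [
--         [1, 4, 4, 4],
--         [4, 2, 4, 4],
--         [4, 4, 3, 4],
--         [4, 4, 4, 4],
--         [4, 4, 4, 4],
--     ]
--
--     state = 0
--     inputstate = 0
--
--     string_length = len(string_input)
--
--     while i != string_length:
--         if string_input[i] == 'A':
--             inputstate = 0
--         elif string_input[i] == 'N':
--             inputstate = 1
--         elif string_input[i] == 'D':
--             inputstate = 2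
--         else:
--             inputstate = 3
--
--         state = table[state][inputstate]
--
--         if state == 4:
--             break
--
--         i += 1
--
--     return i - index
-- ===== SOURCE B (Python) =====
-- def and_fsm(string_input, index):
--     target = "AND"
--     i = index
--     n = len(string_input)
--     matched = 0
--     while i != n and matched < 3:
--         if string_input[i] != target[matched]:
--             break
--         matched += 1
--         i += 1
--     return matched
-- ===== Notes on version B (the rewrite author's own statement) =====
-- stated objective: simpler
-- what changed: Replaces the 5x4 transition table and DFA state with a direct character-by-character comparison against the literal "AND", maintaining a match count instead of an automaton state.
import Mathlib
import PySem

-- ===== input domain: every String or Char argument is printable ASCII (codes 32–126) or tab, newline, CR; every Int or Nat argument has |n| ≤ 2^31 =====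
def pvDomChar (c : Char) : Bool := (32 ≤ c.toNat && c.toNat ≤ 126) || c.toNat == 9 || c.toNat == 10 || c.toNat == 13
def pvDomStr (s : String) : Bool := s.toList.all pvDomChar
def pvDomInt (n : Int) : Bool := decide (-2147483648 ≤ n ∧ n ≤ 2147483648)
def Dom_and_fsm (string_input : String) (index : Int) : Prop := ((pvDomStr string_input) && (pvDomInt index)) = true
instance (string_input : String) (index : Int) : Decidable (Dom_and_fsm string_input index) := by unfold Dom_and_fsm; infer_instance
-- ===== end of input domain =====

-- B replaces A's 5x4 transition table and DFA state with a direct comparison against the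
-- literal "AND" plus a match counter (objective: simpler; same cost).

-- ===== PORT A =====
def andTable : List (List Int) :=
  [[1, 4, 4, 4], [4, 2, 4, 4], [4, 4, 3, 4], [4, 4, 4, 4], [4, 4, 4, 4]]

-- the while loop of A; fuel is an upper bound on the remaining iterations; returns the final i
def andFsmGo (cs : List Char) (n : Int) : Nat → Int → Int → Int
  | 0, i, _ => i
  | fuel + 1, i, state =>
    if i = n then i
    else
      match PySem.List.pyGet? cs i with
      | none => i  -- Python raises IndexError here (excluded by Pre_and_fsm)
      | some c =>
        let inputstate : Int :=
          if c = 'A' then 0 else if c = 'N' then 1 else if c = 'D' then 2 else 3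
        let state' : Int :=
          (PySem.List.pyGet? ((PySem.List.pyGet? andTable state).getD []) inputstate).getD 4
        if state' = 4 then i
        else andFsmGo cs n fuel (i + 1) state'

def and_fsm (string_input : String) (index : Int) : Int :=
  let cs := string_input.toList
  let n : Int := cs.length
  andFsmGo cs n ((n - index).toNat + 1) index 0 - index

-- ===== PORT B =====
-- the while loop of B; returns the final matched count
def andAltGo (cs : List Char) (n : Int) : Nat → Int → Int → Int
  | 0, _, matched => matched
  | fuel + 1, i, matched =>
    if i ≠ n ∧ matched < 3 then
      match PySem.List.pyGet? cs i with
      | none => matched  -- Python raises IndexError here (excluded by Pre_and_fsm)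
      | some c =>
        if c ≠ (PySem.List.pyGet? "AND".toList matched).getD ' ' then matched
        else andAltGo cs n fuel (i + 1) (matched + 1)
    else matched

def and_fsm_alt (string_input : String) (index : Int) : Int :=
  let cs := string_input.toList
  let n : Int := cs.length
  andAltGo cs n ((n - index).toNat + 1) index 0

-- ===== PRECONDITION & SPEC =====
-- Python A raises IndexError iff index > len(string_input) or index < -len(string_input)
def Pre_and_fsm (string_input : String) (index : Int) : Prop :=
  -(string_input.toList.length : Int) ≤ index ∧ index ≤ (string_input.toList.length : Int)
instance (string_input : String) (index : Int) : Decidable (Pre_and_fsm string_input index) := by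
  unfold Pre_and_fsm; infer_instance

def pvWitness_and_fsm : String × Int := ("AND", 0)

def Spec_and_fsm (string_input : String) (index : Int) (out : Int) : Prop := out = and_fsm_alt string_input index
instance (string_input : String) (index : Int) (out : Int) : Decidable (Spec_and_fsm string_input index out) := by unfold Spec_and_fsm; infer_instance

-- ===== CLAIM (what is proved, stated in full; the proofs are below) =====
def Claim_equal_and_fsm : Prop := ∀ (string_input : String) (index : Int), Dom_and_fsm string_input index → Pre_and_fsm string_input index → Spec_and_fsm string_input index (and_fsm string_input index)

-- ===== LEMMAS AND PROOFS =====

-- a successful Python index read implies i < length (negative i is trivially < length)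
lemma pyGet?_some_lt {cs : List Char} {i : Int} {c : Char}
    (h : PySem.List.pyGet? cs i = some c) : i < (cs.length : Int) := by
  rcases lt_or_ge i 0 with hi | hi
  · exact lt_of_lt_of_le hi (by exact_mod_cast Int.natCast_nonneg cs.length)
  · rw [PySem.List.pyGet?_of_nonneg (xs := cs) hi] at h
    obtain ⟨hlen, -⟩ := List.getElem?_eq_some_iff.mp h
    omega

-- row 3 of the table is all 4s
lemma row3 (j : Int) : (PySem.List.pyGet? ((PySem.List.pyGet? andTable 3).getD []) j).getD 4 = 4 := by
  have hrow : (PySem.List.pyGet? andTable 3).getD [] = [4, 4, 4, 4] := by decide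
  rw [hrow]
  rcases h : PySem.List.pyGet? ([4, 4, 4, 4] : List Int) j with _ | v
  · rfl
  · have hv : v ∈ ([4, 4, 4, 4] : List Int) := PySem.List.mem_of_pyGet?_eq_some (xs := [4, 4, 4, 4]) h
    simp at hv
    simp [hv]

-- at state 3 the loop breaks immediately (whatever the character), returning i
lemma andFsmGo_state3 (cs : List Char) (n : Int) (fuel : Nat) (i : Int) :
    andFsmGo cs n (fuel + 1) i 3 = i := by
  unfold andFsmGo
  split
  · rfl
  · rcases h : PySem.List.pyGet? cs i with _ | c
    · rfl
    · simp [row3]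

-- concrete table entries and target characters used in the correspondence proof
lemma t00 : (PySem.List.pyGet? ((PySem.List.pyGet? andTable 0).getD []) 0).getD 4 = 1 := by decide
lemma t01 : (PySem.List.pyGet? ((PySem.List.pyGet? andTable 0).getD []) 1).getD 4 = 4 := by decide
lemma t02 : (PySem.List.pyGet? ((PySem.List.pyGet? andTable 0).getD []) 2).getD 4 = 4 := by decide
lemma t03 : (PySem.List.pyGet? ((PySem.List.pyGet? andTable 0).getD []) 3).getD 4 = 4 := by decide
lemma t10 : (PySem.List.pyGet? ((PySem.List.pyGet? andTable 1).getD []) 0).getD 4 = 4 := by decide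
lemma t11 : (PySem.List.pyGet? ((PySem.List.pyGet? andTable 1).getD []) 1).getD 4 = 2 := by decide
lemma t12 : (PySem.List.pyGet? ((PySem.List.pyGet? andTable 1).getD []) 2).getD 4 = 4 := by decide
lemma t13 : (PySem.List.pyGet? ((PySem.List.pyGet? andTable 1).getD []) 3).getD 4 = 4 := by decide
lemma t20 : (PySem.List.pyGet? ((PySem.List.pyGet? andTable 2).getD []) 0).getD 4 = 4 := by decide
lemma t21 : (PySem.List.pyGet? ((PySem.List.pyGet? andTable 2).getD []) 1).getD 4 = 4 := by decide
lemma t22 : (PySem.List.pyGet? ((PySem.List.pyGet? andTable 2).getD []) 2).getD 4 = 3 := by decide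
lemma t23 : (PySem.List.pyGet? ((PySem.List.pyGet? andTable 2).getD []) 3).getD 4 = 4 := by decide
lemma tg0 : (PySem.List.pyGet? "AND".toList 0).getD ' ' = 'A' := by decide
lemma tg1 : (PySem.List.pyGet? "AND".toList 1).getD ' ' = 'N' := by decide
lemma tg2 : (PySem.List.pyGet? "AND".toList 2).getD ' ' = 'D' := by decide

-- loop correspondence: for states 0,1,2 both loops advance in lockstep and
-- A's final i minus the current i equals B's final matched minus the current matched
lemma go_eq (cs : List Char) : ∀ (fuel : Nat) (i m : Int),
    0 ≤ m → m < 3 → ((cs.length : Int) - i).toNat + 1 ≤ fuel →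
    andFsmGo cs (cs.length : Int) fuel i m - i = andAltGo cs (cs.length : Int) fuel i m - m := by
  intro fuel
  induction fuel with
  | zero => intro i m _ _ hf; omega
  | succ fuel ih =>
    intro i m hm0 hm3 hf
    unfold andFsmGo andAltGo
    by_cases hin : i = (cs.length : Int)
    · simp [hin]
    · simp only [hin, ne_eq, not_false_eq_true, true_and]
      rcases hget : PySem.List.pyGet? cs i with _ | c
      · simp
      · have hlt : i < (cs.length : Int) := pyGet?_some_lt hget
        have hfuel : ((cs.length : Int) - (i + 1)).toNat + 1 ≤ fuel := by omega
        have hm : m = 0 ∨ m = 1 ∨ m = 2 := by omega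
        rcases hm with rfl | rfl | rfl
        · simp only [show ((0:Int) < 3) = True from by simp, if_true, tg0]
          by_cases hA : c = 'A'
          · simp only [hA, Char.reduceEq, reduceIte, t00, Int.reduceEq,
              not_true_eq_false, if_false, Int.reduceAdd]
            have h' := ih (i + 1) 1 (by omega) (by omega) hfuel
            omega
          · by_cases hN : c = 'N'
            · simp [hN, Char.reduceEq, t01]
            · by_cases hD : c = 'D'
              · simp [hD, Char.reduceEq, t02]
              · simp [hA, hN, hD, t03]
        · simp only [show ((1:Int) < 3) = True from by simp, if_true, tg1]
          by_cases hN : c = 'N'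
          · have hA : ¬ c = 'A' := by subst hN; decide
            simp only [hN, Char.reduceEq, reduceIte, t11, Int.reduceEq,
              not_true_eq_false, if_false, Int.reduceAdd]
            have h' := ih (i + 1) 2 (by omega) (by omega) hfuel
            omega
          · by_cases hA : c = 'A'
            · simp [hA, Char.reduceEq, t10]
            · by_cases hD : c = 'D'
              · simp [hD, Char.reduceEq, t12]
              · simp [hA, hN, hD, t13]
        · simp only [show ((2:Int) < 3) = True from by simp, if_true, tg2]
          by_cases hD : c = 'D'
          · have hA : ¬ c = 'A' := by subst hD; decide
            have hN : ¬ c = 'N' := by subst hD; decide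
            simp only [hD, Char.reduceEq, reduceIte, t22, Int.reduceEq,
              not_true_eq_false, if_false, Int.reduceAdd]
            -- A recurses into state 3, which breaks on the next step; B's counter hits 3
            obtain ⟨fuel', rfl⟩ : ∃ k, fuel = k + 1 := ⟨fuel - 1, by omega⟩
            rw [andFsmGo_state3]
            have hb : andAltGo cs (cs.length : Int) (fuel' + 1) (i + 1) 3 = 3 := by
              unfold andAltGo; simp
            rw [hb]
            omega
          · by_cases hA : c = 'A'
            · simp [hA, Char.reduceEq, t20]
            · by_cases hN : c = 'N'
              · simp [hN, Char.reduceEq, t21]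
              · simp [hA, hN, hD, t23]

-- ===== VERDICT (by name: the statement is the Claim_ definition above) =====
theorem and_fsm_spec : Claim_equal_and_fsm := by
  intro s index _ _
  unfold Spec_and_fsm and_fsm and_fsm_alt
  dsimp only
  have h := go_eq s.toList (((s.toList.length : Int) - index).toNat + 1) index 0
    le_rfl (by omega) le_rfl
  omega
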